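-- pv_equiv track=rewrite | github.com/esignor/CCGR | dev/VirusPreprocessingDatasets.py | normalize_flag_virus
-- ===== SOURCE A (Python) =====
-- def normalize_flag_virus(s):
--     result = []
--     for i, c in enumerate(s):
--         if c.isupper():
--             result.append(c.lower())
--         else:
--             result.extend(s[i:])
--             break
--     return ''.join(result)
-- ===== SOURCE B (Python) =====
-- def normalize_flag_virus(s):
--     i = 0
--     while i < len(s) and s[i].isupper():
--         i += 1
--     return s[:i].lower() + s[i:]
-- ===== Notes on version B (the rewrite author's own statement) =====
-- stated objective: simpler
-- what changed: B finds the length of the leading uppercase run with a while loop and returns s[:i].lower() + s[i:], instead of building a char-by-char result list with a break inside an enumerate loop.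
import Mathlib
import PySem

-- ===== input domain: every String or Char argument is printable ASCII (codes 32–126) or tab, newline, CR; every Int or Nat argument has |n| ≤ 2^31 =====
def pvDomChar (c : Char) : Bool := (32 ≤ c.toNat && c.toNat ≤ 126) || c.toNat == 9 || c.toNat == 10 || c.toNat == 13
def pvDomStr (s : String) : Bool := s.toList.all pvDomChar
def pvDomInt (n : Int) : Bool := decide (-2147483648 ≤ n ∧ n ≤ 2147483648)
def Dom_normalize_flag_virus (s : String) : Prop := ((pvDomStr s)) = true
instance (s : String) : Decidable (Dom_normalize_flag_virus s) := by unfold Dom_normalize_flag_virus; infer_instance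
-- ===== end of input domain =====

-- B lowercases the leading uppercase run via a split index and two slices instead of A's
-- char-by-char result list with a break; same values everywhere (objective: simpler).

-- ===== PORT A =====
-- the enumerate loop: on an uppercase char append its lowercase and continue;
-- otherwise extend with the rest of the string (c :: rest = s[i:] here) and break
def pvGoA : List Char → List Char
  | [] => []
  | c :: rest =>
    if PySem.Chars.isupper c then PySem.Chars.lowerChar c :: pvGoA rest
    else c :: rest

def normalize_flag_virus (s : String) : String :=
  String.mk (pvGoA s.toList)

-- ===== PORT B =====
-- the while loop advancing i while i < len(s) and s[i].isupper()
def pvRunLen : List Char → Nat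
  | [] => 0
  | c :: rest => if PySem.Chars.isupper c then pvRunLen rest + 1 else 0

def normalize_flag_virus_alt (s : String) : String :=
  let cs := s.toList
  let i : Int := (pvRunLen cs : Int)
  String.mk (PySem.Chars.lower (PySem.List.slice cs none (some i)) ++
             PySem.List.slice cs (some i) none)

-- ===== PRECONDITION & SPEC =====
def Spec_normalize_flag_virus (s : String) (out : String) : Prop := out = normalize_flag_virus_alt s
instance (s : String) (out : String) : Decidable (Spec_normalize_flag_virus s out) := by unfold Spec_normalize_flag_virus; infer_instance

-- ===== CLAIM (what is proved, stated in full; the proofs are below) =====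
def Claim_equal_normalize_flag_virus : Prop := ∀ (s : String), Dom_normalize_flag_virus s → Spec_normalize_flag_virus s (normalize_flag_virus s)

-- ===== LEMMAS AND PROOFS =====
theorem pvGoA_eq (cs : List Char) :
    pvGoA cs = PySem.Chars.lower (cs.take (pvRunLen cs)) ++ cs.drop (pvRunLen cs) := by
  induction cs with
  | nil => simp [pvGoA, pvRunLen, PySem.Chars.lower]
  | cons c rest ih =>
    by_cases h : PySem.Chars.isupper c
    · simp [pvGoA, pvRunLen, h, ih, PySem.Chars.lower]
    · simp [pvGoA, pvRunLen, h, PySem.Chars.lower]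

-- ===== VERDICT (by name: the statement is the Claim_ definition above) =====
theorem normalize_flag_virus_spec : Claim_equal_normalize_flag_virus := by
  intro s _
  unfold Spec_normalize_flag_virus normalize_flag_virus normalize_flag_virus_alt
  simp [PySem.List.slice_to_natCast, PySem.List.slice_from_natCast, pvGoA_eq]
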